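-- pv_equiv track=rewrite | github.com/GoldmanYT/SAOD_labs | lab1/main.py | digits_at_the_end
-- ===== SOURCE A (Python) =====
-- class Deque:
--     """
--     Очередь на основе массива:
--     left: указатель на элемент левее начала дека
--     right: указатель на элемент правее конца дека
--     data: закольцованный массив с данными
--     (m - 1): максимальное количество элементов
--     """
--     def __init__(self, m):
--         self.m = m
--         self.data = [None] * m
--         self.left = 0
--         self.right = 1
--
--     def is_empty(self):
--         return (self.left + 1) % self.m == self.right
--
--     def push_left(self, x):
--         self.data[self.left] = x
--         self.left = (self.left - 1) % self.m
--         if self.is_empty():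
--             raise OverflowError
--
--     def push_right(self, x):
--         self.data[self.right] = x
--         self.right = (self.right + 1) % self.m
--         if self.is_empty():
--             raise OverflowError
--
--     def pop_left(self):
--         if self.is_empty():
--             raise ValueError
--         self.left = (self.left + 1) % self.m
--         result = self.data[self.left]
--         self.data[self.left] = None
--         return result
--
--     def pop_right(self):
--         if self.is_empty():
--             raise ValueError
--         self.right = (self.right - 1) % self.m
--         result = self.data[self.right]
--         self.data[self.right] = None
--         return result
--
-- def digits_at_the_end(text):
--     result = []
--     for s in text.split('\n'):
--         d = Deque(len(s) + 1)
--         ans = ''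
--         for c in s:
--             if c.isdigit():
--                 d.push_right(c)
--             else:
--                 ans += c
--         while not d.is_empty():
--             ans += d.pop_left()
--         result.append(ans)
--     return '\n'.join(result)
-- ===== SOURCE B (Python) =====
-- def digits_at_the_end(text):
--     return '\n'.join(
--         ''.join(c for c in s if not c.isdigit()) + ''.join(c for c in s if c.isdigit())
--         for s in text.split('\n')
--     )
-- ===== Notes on version B (the rewrite author's own statement) =====
-- stated objective: simpler
-- what changed: Replaced the custom ring-buffer Deque (one classify pass pushing digits into a queue, then a drain loop popping them) by two independent order-preserving filter passes per line (non-digits then digits), dropping the Deque class and all queue state; Pre_ excludes texts containing an empty line, on which A raises TypeError (ans += None).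
import Mathlib
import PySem

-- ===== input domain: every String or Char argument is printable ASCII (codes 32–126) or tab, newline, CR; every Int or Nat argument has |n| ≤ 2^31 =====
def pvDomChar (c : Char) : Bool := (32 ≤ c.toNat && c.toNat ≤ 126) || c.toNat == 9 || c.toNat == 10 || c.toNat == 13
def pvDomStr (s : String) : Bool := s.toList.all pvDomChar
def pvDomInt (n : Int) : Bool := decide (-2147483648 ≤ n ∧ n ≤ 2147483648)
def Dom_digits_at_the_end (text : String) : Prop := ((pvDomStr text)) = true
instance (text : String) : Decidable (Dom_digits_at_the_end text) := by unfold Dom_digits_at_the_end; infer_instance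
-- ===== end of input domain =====

-- B replaces A's per-line ring-buffer Deque (classify pass + drain loop) by two order-preserving
-- filter passes per line (non-digits, then digits): simpler, no queue state.

-- ===== PORT A =====
structure PyDeque where
  m : Int
  data : List (Option Char)
  left : Int
  right : Int
deriving Repr, DecidableEq

def dqNew (m : Int) : PyDeque := ⟨m, List.replicate m.toNat none, 0, 1⟩

def dqIsEmpty (d : PyDeque) : Bool := PySem.Int.mod (d.left + 1) d.m == d.right

-- push_right; `none` = OverflowError.  Indices produced by `%` with m > 0 lie in [0, m),
-- so `.toNat` is exact there and List.set is Python's `data[i] = x`.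
def dqPushRight (d : PyDeque) (x : Char) : Option PyDeque :=
  let d' : PyDeque := { d with data := d.data.set d.right.toNat (some x),
                               right := PySem.Int.mod (d.right + 1) d.m }
  if dqIsEmpty d' then none else some d'

-- pop_left; outer `none` = ValueError; the popped cell may hold Python's None.
def dqPopLeft (d : PyDeque) : Option (Option Char × PyDeque) :=
  if dqIsEmpty d then none else
    let l := PySem.Int.mod (d.left + 1) d.m
    some (d.data.getD l.toNat none, { d with left := l, data := d.data.set l.toNat none })

-- the `while not d.is_empty(): ans += d.pop_left()` loop; the fuel only bounds the iteration count
-- (fuel = m suffices: the deque holds at most m - 1 items); `none` = the Python raises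
-- (`ans += None` is a TypeError when the popped cell holds None).
def dqDrain : Nat → PyDeque → List Char → Option (List Char)
  | 0, _, _ => none
  | fuel + 1, d, ans =>
    if dqIsEmpty d then some ans
    else match dqPopLeft d with
      | some (some c, d') => dqDrain fuel d' (ans ++ [c])
      | _ => none

-- body of `for s in text.split('\n')`
def pvLineA (s : List Char) : Option (List Char) :=
  let st := s.foldl
    (fun (st : Option (PyDeque × List Char)) c =>
      st.bind fun dans =>
        if PySem.Chars.isdigit c then (dqPushRight dans.1 c).map fun d' => (d', dans.2)
        else some (dans.1, dans.2 ++ [c]))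
    (some (dqNew ((s.length : Int) + 1), []))
  st.bind fun dans => dqDrain dans.1.m.toNat dans.1 dans.2

def digits_at_the_end (text : String) : String :=
  let result := (PySem.Chars.splitOn text.toList ['\n']).foldl
    (fun (acc : Option (List (List Char))) s =>
      acc.bind fun r => (pvLineA s).map fun a => r ++ [a])
    (some [])
  match result with
  | some r => String.ofList (PySem.Chars.join ['\n'] r)
  | none => ""   -- unreachable under Pre_: there the Python raises

-- ===== PORT B =====
def digits_at_the_end_alt (text : String) : String :=
  String.ofList (PySem.Chars.join ['\n']
    ((PySem.Chars.splitOn text.toList ['\n']).map fun s =>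
      s.filter (fun c => !PySem.Chars.isdigit c) ++ s.filter (fun c => PySem.Chars.isdigit c)))

-- ===== PRECONDITION & SPEC =====
-- Pre_ excludes exactly the texts containing an empty line: there A raises TypeError
-- (Deque(1) looks non-empty, pop_left yields None, `ans += None` fails).
def Pre_digits_at_the_end (text : String) : Prop :=
  ∀ s ∈ PySem.Chars.splitOn text.toList ['\n'], s ≠ []
instance (text : String) : Decidable (Pre_digits_at_the_end text) := by
  unfold Pre_digits_at_the_end; infer_instance

def pvWitness_digits_at_the_end : String := "ab1c\n2x 3"

def Spec_digits_at_the_end (text : String) (out : String) : Prop := out = digits_at_the_end_alt text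
instance (text : String) (out : String) : Decidable (Spec_digits_at_the_end text out) := by
  unfold Spec_digits_at_the_end; infer_instance

-- ===== CLAIM (what is proved, stated in full; the proofs are below) =====
def Claim_equal_digits_at_the_end : Prop := ∀ (text : String), Dom_digits_at_the_end text → Pre_digits_at_the_end text → Spec_digits_at_the_end text (digits_at_the_end text)

-- ===== LEMMAS AND PROOFS =====

-- canonical deque state: j cells already popped (all none), the queued digits, r free cells
def pvCanon (j : Nat) (digs : List Char) (r : Nat) : PyDeque :=
  { m := ((j + 1 + digs.length + r : Nat) : Int),
    data := List.replicate (j + 1) none ++ digs.map some ++ List.replicate r none,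
    left := (j : Nat),
    right := (((j + 1 + digs.length) % (j + 1 + digs.length + r) : Nat) : Int) }

lemma pvModNat (j k r : Nat) :
    ((j + 1) % (j + 1 + k + r) = (j + 1 + k) % (j + 1 + k + r)) ↔ k = 0 := by
  constructor
  · intro h
    rcases Nat.lt_or_ge (j + 1 + k) (j + 1 + k + r) with hr | hr
    · rw [Nat.mod_eq_of_lt (by omega), Nat.mod_eq_of_lt hr] at h; omega
    · have hr0 : r = 0 := by omega
      subst hr0
      rcases Nat.eq_zero_or_pos k with hk | hk
      · exact hk
      · simp only [Nat.add_zero] at h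
        rw [Nat.mod_eq_of_lt (by omega), Nat.mod_self] at h; omega
  · rintro rfl; rfl

lemma pv_isEmpty (j : Nat) (digs : List Char) (r : Nat) :
    dqIsEmpty (pvCanon j digs r) = digs.isEmpty := by
  simp only [dqIsEmpty, pvCanon]
  have h1 : ((j : Int) + 1) = ((j + 1 : Nat) : Int) := by push_cast; ring
  rw [h1, PySem.Int.mod_natCast, Bool.eq_iff_iff]
  simp only [beq_iff_eq, Nat.cast_inj, List.isEmpty_iff]
  rw [pvModNat j digs.length r, List.length_eq_zero_iff]

lemma pv_push (j : Nat) (digs : List Char) (r : Nat) (c : Char) (hr : 1 ≤ r) :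
    dqPushRight (pvCanon j digs r) c = some (pvCanon j (digs ++ [c]) (r - 1)) := by
  have h2 : j + 1 + digs.length < j + 1 + digs.length + r := by omega
  have hd' : ({ m := ((j + 1 + digs.length + r : Nat) : Int),
                data := ((List.replicate (j + 1) (none : Option Char) ++ digs.map some ++ List.replicate r none).set
                  (((((j + 1 + digs.length) % (j + 1 + digs.length + r) : Nat) : Int)).toNat) (some c)),
                left := (j : Nat),
                right := PySem.Int.mod ((((j + 1 + digs.length) % (j + 1 + digs.length + r) : Nat) : Int) + 1)
                  ((j + 1 + digs.length + r : Nat) : Int) } : PyDeque)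
            = pvCanon j (digs ++ [c]) (r - 1) := by
    rw [Nat.mod_eq_of_lt h2]
    have h3 : (((j + 1 + digs.length : Nat) : Int) + 1) = ((j + 1 + digs.length + 1 : Nat) : Int) := by
      push_cast; ring
    rw [h3, PySem.Int.mod_natCast, Int.toNat_natCast]
    simp only [pvCanon, PyDeque.mk.injEq, List.length_append, List.length_singleton]
    refine ⟨by norm_cast; omega, ?_, trivial, by norm_cast; congr 1; omega⟩
    · rw [List.append_assoc, List.set_append_right _ _ (by simp),
          List.set_append_right _ _ (by simp), ← List.append_assoc]
      simp only [List.length_replicate, List.length_map]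
      have h4 : j + 1 + digs.length - (j + 1) - digs.length = 0 := by omega
      rw [h4]
      cases r with
      | zero => omega
      | succ n => simp [List.replicate_succ]
  unfold dqPushRight
  simp only [pvCanon] at hd' ⊢
  rw [hd', ← pvCanon, pv_isEmpty]
  simp

lemma pv_pop (j : Nat) (c : Char) (ds : List Char) (r : Nat) :
    dqPopLeft (pvCanon j (c :: ds) r) = some (some c, pvCanon (j + 1) ds r) := by
  unfold dqPopLeft
  rw [pv_isEmpty]
  simp only [List.isEmpty_cons, Bool.false_eq_true, if_false]
  have hlt : j + 1 < j + 1 + (c :: ds).length + r := by simp; omega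
  have h1 : ((pvCanon j (c :: ds) r).left + 1) = ((j + 1 : Nat) : Int) := by
    simp [pvCanon]
  rw [h1]
  have h2 : PySem.Int.mod ((j + 1 : Nat) : Int) (pvCanon j (c :: ds) r).m = ((j + 1 : Nat) : Int) := by
    simp only [pvCanon, PySem.Int.mod_natCast]
    congr 1
    exact Nat.mod_eq_of_lt hlt
  rw [h2, Int.toNat_natCast]
  simp only [Option.some.injEq, Prod.mk.injEq]
  refine ⟨?_, ?_⟩
  · simp [pvCanon, List.getD_eq_getElem?_getD, List.append_assoc]
  · simp only [pvCanon, PyDeque.mk.injEq, List.length_cons]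
    refine ⟨by norm_cast; omega, ?_, by norm_cast, by norm_cast; congr 1 <;> omega⟩
    rw [List.append_assoc, List.set_append_right _ _ (by simp),
        List.length_replicate, Nat.sub_self]
    simp only [List.map_cons, List.cons_append, List.set_cons_zero]
    simp [List.replicate_succ', List.append_assoc]

lemma pv_drain (digs : List Char) : ∀ (fuel j r : Nat) (ans : List Char),
    digs.length < fuel → dqDrain fuel (pvCanon j digs r) ans = some (ans ++ digs) := by
  induction digs with
  | nil =>
    intro fuel j r ans h
    match fuel, h with
    | fuel + 1, _ => simp [dqDrain, pv_isEmpty]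
  | cons c ds ih =>
    intro fuel j r ans h
    match fuel, h with
    | fuel + 1, h =>
      rw [dqDrain, pv_isEmpty]
      simp only [List.isEmpty_cons, Bool.false_eq_true, if_false, pv_pop]
      rw [ih fuel (j+1) r (ans ++ [c]) (by simp at h ⊢; omega)]
      simp

lemma pv_fold (cs : List Char) : ∀ (digs : List Char) (r : Nat) (ans : List Char),
    cs.length ≤ r →
    cs.foldl
      (fun (st : Option (PyDeque × List Char)) c =>
        st.bind fun dans =>
          if PySem.Chars.isdigit c then (dqPushRight dans.1 c).map fun d' => (d', dans.2)
          else some (dans.1, dans.2 ++ [c]))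
      (some (pvCanon 0 digs r, ans))
    = some (pvCanon 0 (digs ++ cs.filter PySem.Chars.isdigit)
              (r - (cs.filter PySem.Chars.isdigit).length),
            ans ++ cs.filter (fun c => !PySem.Chars.isdigit c)) := by
  induction cs with
  | nil => intro digs r ans _; simp
  | cons c cs ih =>
    intro digs r ans h
    simp only [List.foldl_cons, Option.bind_some]
    by_cases hc : PySem.Chars.isdigit c
    · rw [if_pos hc, pv_push 0 digs r c (by simp at h; omega)]
      simp only [Option.map_some]
      rw [ih (digs ++ [c]) (r - 1) ans (by simp at h; omega)]
      have hr1 : r - 1 - (cs.filter PySem.Chars.isdigit).length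
          = r - ((cs.filter PySem.Chars.isdigit).length + 1) := by omega
      rw [hr1]
      simp [hc]
    · rw [if_neg hc]
      rw [ih digs r (ans ++ [c]) (by simp at h; omega)]
      simp [hc]

lemma pv_lineA (s : List Char) (hs : s ≠ []) :
    pvLineA s = some (s.filter (fun c => !PySem.Chars.isdigit c) ++ s.filter PySem.Chars.isdigit) := by
  have hlen : 1 ≤ s.length := by
    cases s with | nil => exact absurd rfl hs | cons a t => simp
  have hnew : dqNew ((s.length : Int) + 1) = pvCanon 0 [] s.length := by
    simp only [dqNew, pvCanon, PyDeque.mk.injEq, List.length_nil, List.map_nil]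
    refine ⟨by push_cast; ring, ?_, by norm_cast, ?_⟩
    · have h0 : ((s.length : Int) + 1).toNat = s.length + 1 := by omega
      rw [h0]
      simp [List.replicate_succ]
    · rw [Nat.mod_eq_of_lt (by omega)]
      norm_cast
  unfold pvLineA
  rw [hnew, pv_fold s [] s.length [] (le_refl _)]
  simp only [List.nil_append, Option.bind_some]
  have hflen : (s.filter PySem.Chars.isdigit).length ≤ s.length := List.length_filter_le _ _
  have hm : (pvCanon 0 (s.filter PySem.Chars.isdigit) (s.length - (s.filter PySem.Chars.isdigit).length)).m.toNat
      = s.length + 1 := by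
    simp only [pvCanon]
    rw [Int.toNat_natCast]
    omega
  rw [hm, pv_drain _ _ _ _ _ (by omega)]

lemma pv_lines (L : List (List Char)) : ∀ (acc : List (List Char)), (∀ s ∈ L, s ≠ []) →
    L.foldl
      (fun (a : Option (List (List Char))) s =>
        a.bind fun r => (pvLineA s).map fun x => r ++ [x])
      (some acc)
    = some (acc ++ L.map fun s =>
        s.filter (fun c => !PySem.Chars.isdigit c) ++ s.filter PySem.Chars.isdigit) := by
  induction L with
  | nil => intro acc _; simp
  | cons s L ih =>
    intro acc h
    simp only [List.foldl_cons, Option.bind_some, pv_lineA s (h s (by simp)), Option.map_some]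
    rw [ih (acc ++ [_]) (fun t ht => h t (by simp [ht]))]
    simp

-- ===== VERDICT (by name: the statement is the Claim_ definition above) =====
theorem digits_at_the_end_spec : Claim_equal_digits_at_the_end := by
  intro text _ hpre
  unfold Spec_digits_at_the_end digits_at_the_end digits_at_the_end_alt
  rw [pv_lines _ [] hpre]
  rfl
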